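-- pv_equiv track=rewrite | github.com/jnward/coactivation-manifolds | src/coactivation_manifolds/activation_reader.py | _compress_runs
-- ===== SOURCE A (Python) =====
-- from typing import Dict, Iterable, List, Sequence, Tuple
--
-- def _compress_runs(row_ids: Sequence[int]) -> List[Tuple[int, int]]:
--     if not row_ids:
--         return []
--     runs: List[Tuple[int, int]] = []
--     start = row_ids[0]
--     prev = start
--     for current in row_ids[1:]:
--         if current == prev + 1:
--             prev = current
--             continue
--         runs.append((start, prev + 1))
--         start = current
--         prev = current
--     runs.append((start, prev + 1))
--     return runs
-- ===== SOURCE B (Python) =====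
-- from itertools import groupby
-- from typing import List, Sequence, Tuple
--
-- def _compress_runs(row_ids: Sequence[int]) -> List[Tuple[int, int]]:
--     runs: List[Tuple[int, int]] = []
--     for _, grp in groupby(enumerate(row_ids), key=lambda iv: iv[1] - iv[0]):
--         members = list(grp)
--         runs.append((members[0][1], members[-1][1] + 1))
--     return runs
-- ===== Notes on version B (the rewrite author's own statement) =====
-- stated objective: idiomatic
-- what changed: Replaces explicit start/prev boundary tracking with itertools.groupby over enumerate(row_ids) keyed by value-index, so each maximal consecutive run is one group whose first and last members give (start, end).
import Mathlib
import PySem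

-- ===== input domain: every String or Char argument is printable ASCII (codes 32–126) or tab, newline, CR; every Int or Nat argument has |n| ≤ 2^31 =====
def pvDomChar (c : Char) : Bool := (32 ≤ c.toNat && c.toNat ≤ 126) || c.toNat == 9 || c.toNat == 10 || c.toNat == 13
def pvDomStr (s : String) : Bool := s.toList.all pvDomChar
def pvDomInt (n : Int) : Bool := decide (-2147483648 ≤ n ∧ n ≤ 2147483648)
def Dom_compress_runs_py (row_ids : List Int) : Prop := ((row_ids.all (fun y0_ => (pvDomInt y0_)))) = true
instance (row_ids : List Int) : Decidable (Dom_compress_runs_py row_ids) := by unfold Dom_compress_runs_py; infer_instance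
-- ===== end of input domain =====

-- B replaces A's explicit start/prev run tracking with a groupby over enumerate keyed by value-index (idiomatic decomposition, same cost).

-- ===== PORT A =====
-- the for-loop of A over row_ids[1:], carrying (runs, start, prev)
def aLoop (runs : List (Int × Int)) (start prev : Int) : List Int → List (Int × Int)
  | [] => runs ++ [(start, prev + 1)]
  | c :: rest =>
      if c = prev + 1 then aLoop runs start c rest
      else aLoop (runs ++ [(start, prev + 1)]) c c rest

def compress_runs_py (row_ids : List Int) : List (Int × Int) :=
  match row_ids with
  | [] => []
  | h :: t => aLoop [] h h t

-- ===== PORT B =====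
-- enumerate(row_ids) starting at index i (exact port of Python's enumerate, with Int indices)
def enumFrom (i : Int) : List Int → List (Int × Int)
  | [] => []
  | v :: vs => (i, v) :: enumFrom (i + 1) vs

-- members[-1] of the nonempty list x :: ys
def lastPair (x : Int × Int) : List (Int × Int) → (Int × Int)
  | [] => x
  | y :: ys => lastPair y ys

-- itertools.groupby with key iv.2 - iv.1, each group mapped to (members[0].2, members[-1].2 + 1)
def bGroups : List (Int × Int) → List (Int × Int)
  | [] => []
  | x :: xs =>
      (x.2, (lastPair x (xs.takeWhile (fun y => y.2 - y.1 == x.2 - x.1))).2 + 1)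
        :: bGroups (xs.dropWhile (fun y => y.2 - y.1 == x.2 - x.1))
termination_by l => l.length
decreasing_by
  have := List.length_dropWhile_le (fun y => y.2 - y.1 == x.2 - x.1) xs
  simp only [List.length_cons]; omega

def compress_runs_py_alt (row_ids : List Int) : List (Int × Int) :=
  bGroups (enumFrom 0 row_ids)

-- ===== PRECONDITION & SPEC =====
def Spec_compress_runs_py (row_ids : List Int) (out : List (Int × Int)) : Prop := out = compress_runs_py_alt row_ids
instance (row_ids : List Int) (out : List (Int × Int)) : Decidable (Spec_compress_runs_py row_ids out) := by unfold Spec_compress_runs_py; infer_instance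

-- ===== CLAIM (what is proved, stated in full; the proofs are below) =====
def Claim_equal_compress_runs_py : Prop := ∀ (row_ids : List Int), Dom_compress_runs_py row_ids → Spec_compress_runs_py row_ids (compress_runs_py row_ids)

-- ===== LEMMAS AND PROOFS =====

-- A's accumulator only ever grows at the front
theorem aLoop_acc (xs : List Int) : ∀ (runs : List (Int × Int)) (start prev : Int),
    aLoop runs start prev xs = runs ++ aLoop [] start prev xs := by
  induction xs with
  | nil => intro runs start prev; simp [aLoop]
  | cons c rest ih =>
      intro runs start prev
      by_cases h : c = prev + 1
      · rw [aLoop, aLoop, if_pos h, if_pos h]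
        exact ih runs start c
      · rw [aLoop, aLoop, if_neg h, if_neg h, List.nil_append,
          ih (runs ++ [(start, prev + 1)]) c c, ih [(start, prev + 1)] c c]
        simp

-- main invariant: A's loop state (start, prev) with prev enumerated as pair x
-- corresponds to B's currently open group
theorem main_inv (xs : List Int) : ∀ (start : Int) (x : Int × Int),
    aLoop [] start x.2 xs =
      (start, (lastPair x ((enumFrom (x.1 + 1) xs).takeWhile
          (fun y => y.2 - y.1 == x.2 - x.1))).2 + 1)
        :: bGroups ((enumFrom (x.1 + 1) xs).dropWhile
          (fun y => y.2 - y.1 == x.2 - x.1)) := by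
  induction xs with
  | nil => intro start x; simp [aLoop, enumFrom, lastPair, bGroups]
  | cons c rest ih =>
      intro start x
      by_cases h : c = x.2 + 1
      · have hk : (c - (x.1 + 1) == x.2 - x.1) = true := by simp; omega
        simp only [aLoop, h, enumFrom, List.takeWhile_cons, List.dropWhile_cons, if_true]
        have hkey : x.2 + 1 - (x.1 + 1) = x.2 - x.1 := by ring
        have := ih start (x.1 + 1, c)
        simp only [h, hkey] at this
        rw [this]
        simp [lastPair]
      · have hk : (c - (x.1 + 1) == x.2 - x.1) = false := by simp; omega
        simp only [aLoop, if_neg h, enumFrom, List.takeWhile_cons, List.dropWhile_cons, hk,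
          Bool.false_eq_true, if_false, lastPair, List.nil_append]
        rw [aLoop_acc rest [(start, x.2 + 1)] c c, bGroups]
        have := ih c (x.1 + 1, c)
        simp only at this
        rw [this]
        simp

-- ===== VERDICT (by name: the statement is the Claim_ definition above) =====
theorem compress_runs_py_spec : Claim_equal_compress_runs_py := by
  intro row_ids _
  unfold Spec_compress_runs_py compress_runs_py compress_runs_py_alt
  match row_ids with
  | [] => simp [bGroups, enumFrom]
  | h :: t =>
      simp only [enumFrom]
      rw [bGroups]
      have := main_inv t h (0, h)
      simp only at this
      rw [this]
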